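-- pv_equiv track=rewrite | github.com/rodunia/llm_research_app | scripts/compare_three_way.py | three_way_comparison
-- ===== SOURCE A (Python) =====
-- def three_way_comparison(glass_box, gpt4o_r1, gpt4o_r2):
--     """Compare detection across all three runs."""
--
--     comparison = {
--         'all_three': [],
--         'glass_box_only': [],
--         'gpt4o_both': [],
--         'gpt4o_r1_only': [],
--         'gpt4o_r2_only': [],
--         'none': []
--     }
--
--     all_files = sorted(set(glass_box.keys()) | set(gpt4o_r1.keys()) | set(gpt4o_r2.keys()))
--
--     for file_id in all_files:
--         gb = glass_box.get(file_id, {}).get('detected', False)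
--         g1 = gpt4o_r1.get(file_id, {}).get('detected', False)
--         g2 = gpt4o_r2.get(file_id, {}).get('detected', False)
--
--         if gb and g1 and g2:
--             comparison['all_three'].append(file_id)
--         elif gb and not g1 and not g2:
--             comparison['glass_box_only'].append(file_id)
--         elif not gb and g1 and g2:
--             comparison['gpt4o_both'].append(file_id)
--         elif not gb and g1 and not g2:
--             comparison['gpt4o_r1_only'].append(file_id)
--         elif not gb and not g1 and g2:
--             comparison['gpt4o_r2_only'].append(file_id)
--         elif not gb and not g1 and not g2:
--             comparison['none'].append(file_id)
--
--     return comparison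
-- ===== SOURCE B (Python) =====
-- def three_way_comparison(glass_box, gpt4o_r1, gpt4o_r2):
--     """Compute each of the six categories as an independent filter over the
--     sorted union of file ids, instead of one mutating bucket pass."""
--
--     def det(run, fid):
--         return run.get(fid, {}).get('detected', False)
--
--     files = sorted(set(glass_box.keys()) | set(gpt4o_r1.keys()) | set(gpt4o_r2.keys()))
--
--     def pick(wgb, w1, w2):
--         return [f for f in files
--                 if det(glass_box, f) == wgb
--                 and det(gpt4o_r1, f) == w1
--                 and det(gpt4o_r2, f) == w2]
--
--     return {
--         'all_three': pick(True, True, True),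
--         'glass_box_only': pick(True, False, False),
--         'gpt4o_both': pick(False, True, True),
--         'gpt4o_r1_only': pick(False, True, False),
--         'gpt4o_r2_only': pick(False, False, True),
--         'none': pick(False, False, False),
--     }
-- ===== Notes on version B (the rewrite author's own statement) =====
-- stated objective: alternative
-- what changed: Replaces A's single stateful pass (a pre-initialised result dict mutated through a six-way if/elif chain) by a pure staged decomposition: each category is computed independently as a filter of the sorted union by its exact (gb,g1,g2) triple; the two unnamed triples match no filter and so vanish naturally.
import Mathlib
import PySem

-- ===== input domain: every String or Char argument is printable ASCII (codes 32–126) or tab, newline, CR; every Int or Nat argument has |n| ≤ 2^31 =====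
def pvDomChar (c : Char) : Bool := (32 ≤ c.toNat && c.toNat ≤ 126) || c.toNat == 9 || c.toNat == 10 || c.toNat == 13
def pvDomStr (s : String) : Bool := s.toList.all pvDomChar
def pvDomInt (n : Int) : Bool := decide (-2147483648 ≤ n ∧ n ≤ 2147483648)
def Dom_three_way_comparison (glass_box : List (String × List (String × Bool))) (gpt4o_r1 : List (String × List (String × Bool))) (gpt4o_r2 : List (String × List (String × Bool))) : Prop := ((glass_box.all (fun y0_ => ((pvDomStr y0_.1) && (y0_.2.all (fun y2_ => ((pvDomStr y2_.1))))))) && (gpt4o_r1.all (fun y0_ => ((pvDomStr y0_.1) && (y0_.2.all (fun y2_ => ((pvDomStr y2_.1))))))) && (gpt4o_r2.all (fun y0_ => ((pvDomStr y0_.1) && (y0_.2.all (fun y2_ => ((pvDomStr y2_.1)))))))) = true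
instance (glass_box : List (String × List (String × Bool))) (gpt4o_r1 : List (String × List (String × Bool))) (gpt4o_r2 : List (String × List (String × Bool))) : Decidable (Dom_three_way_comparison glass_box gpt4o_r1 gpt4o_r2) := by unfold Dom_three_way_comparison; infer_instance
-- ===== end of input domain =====

-- B computes each of the six categories as an independent pure filter of the sorted union by its
-- exact (gb,g1,g2) triple, instead of A's single stateful pass mutating a bucket dict; same cost.


-- ===== PORT A =====
-- `.get(file_id, {}).get('detected', False)` — identical expression in both Pythons
def pvDet (d : PySem.Dict String (List (String × Bool))) (file_id : String) : Bool :=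
  (PySem.Dict.ofList (d.getD file_id [])).getD "detected" false

def three_way_comparison (glass_box : List (String × List (String × Bool))) (gpt4o_r1 : List (String × List (String × Bool))) (gpt4o_r2 : List (String × List (String × Bool))) : List (String × List String) :=
  let comparison : PySem.Dict String (List String) :=
    PySem.Dict.ofList [("all_three", []), ("glass_box_only", []), ("gpt4o_both", []),
      ("gpt4o_r1_only", []), ("gpt4o_r2_only", []), ("none", [])]
  let dgb := PySem.Dict.ofList glass_box
  let d1 := PySem.Dict.ofList gpt4o_r1
  let d2 := PySem.Dict.ofList gpt4o_r2
  let all_files := PySem.List.sorted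
    (PySem.Set.union (PySem.Set.union (PySem.Set.ofList dgb.keys) d1.keys) d2.keys)
    (fun x => x) false
  let final := all_files.foldl (fun c file_id =>
    let gb := pvDet dgb file_id
    let g1 := pvDet d1 file_id
    let g2 := pvDet d2 file_id
    if gb && g1 && g2 then c.modify "all_three" [] (· ++ [file_id])
    else if gb && !g1 && !g2 then c.modify "glass_box_only" [] (· ++ [file_id])
    else if !gb && g1 && g2 then c.modify "gpt4o_both" [] (· ++ [file_id])
    else if !gb && g1 && !g2 then c.modify "gpt4o_r1_only" [] (· ++ [file_id])
    else if !gb && !g1 && g2 then c.modify "gpt4o_r2_only" [] (· ++ [file_id])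
    else if !gb && !g1 && !g2 then c.modify "none" [] (· ++ [file_id])
    else c) comparison
  final.items

-- ===== PORT B =====
-- `pick(wgb, w1, w2)` from Source B: one independent filter of the sorted union per category
def pvPick (files : List String)
    (dgb d1 d2 : PySem.Dict String (List (String × Bool)))
    (wgb w1 w2 : Bool) : List String :=
  files.filter (fun f => (pvDet dgb f == wgb) && (pvDet d1 f == w1) && (pvDet d2 f == w2))

def three_way_comparison_alt (glass_box : List (String × List (String × Bool))) (gpt4o_r1 : List (String × List (String × Bool))) (gpt4o_r2 : List (String × List (String × Bool))) : List (String × List String) :=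
  let dgb := PySem.Dict.ofList glass_box
  let d1 := PySem.Dict.ofList gpt4o_r1
  let d2 := PySem.Dict.ofList gpt4o_r2
  let files := PySem.List.sorted
    (PySem.Set.union (PySem.Set.union (PySem.Set.ofList dgb.keys) d1.keys) d2.keys)
    (fun x => x) false
  [("all_three", pvPick files dgb d1 d2 true true true),
   ("glass_box_only", pvPick files dgb d1 d2 true false false),
   ("gpt4o_both", pvPick files dgb d1 d2 false true true),
   ("gpt4o_r1_only", pvPick files dgb d1 d2 false true false),
   ("gpt4o_r2_only", pvPick files dgb d1 d2 false false true),
   ("none", pvPick files dgb d1 d2 false false false)]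

-- ===== PRECONDITION & SPEC =====
def Spec_three_way_comparison (glass_box : List (String × List (String × Bool))) (gpt4o_r1 : List (String × List (String × Bool))) (gpt4o_r2 : List (String × List (String × Bool))) (out : List (String × List String)) : Prop := out = three_way_comparison_alt glass_box gpt4o_r1 gpt4o_r2
instance (glass_box : List (String × List (String × Bool))) (gpt4o_r1 : List (String × List (String × Bool))) (gpt4o_r2 : List (String × List (String × Bool))) (out : List (String × List String)) : Decidable (Spec_three_way_comparison glass_box gpt4o_r1 gpt4o_r2 out) := by unfold Spec_three_way_comparison; infer_instance

-- ===== CLAIM =====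
def Claim_equal_three_way_comparison : Prop := ∀ (glass_box : List (String × List (String × Bool))) (gpt4o_r1 : List (String × List (String × Bool))) (gpt4o_r2 : List (String × List (String × Bool))), Dom_three_way_comparison glass_box gpt4o_r1 gpt4o_r2 → Spec_three_way_comparison glass_box gpt4o_r1 gpt4o_r2 (three_way_comparison glass_box gpt4o_r1 gpt4o_r2)

-- ===== LEMMAS AND PROOFS =====

-- one step of either fold, phrased per entry: (if c then a++[x] else a) ++ b re-associated
theorem pvIfAppend (c : Bool) (a b : List String) (x : String) :
    (if c then a ++ [x] else a) ++ b = a ++ (if c then x :: b else b) := by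
  cases c <;> simp

-- one step of A's loop on the six-bucket dict, entry by entry
theorem pvStepA (G1 G2 G3 : String → Bool) (f : String) (l1 l2 l3 l4 l5 l6 : List String) :
    (let gb := G1 f
     let g1 := G2 f
     let g2 := G3 f
     if gb && g1 && g2 then (PySem.Dict.mk [("all_three", l1), ("glass_box_only", l2), ("gpt4o_both", l3),
        ("gpt4o_r1_only", l4), ("gpt4o_r2_only", l5), ("none", l6)]).modify "all_three" [] (· ++ [f])
     else if gb && !g1 && !g2 then (PySem.Dict.mk [("all_three", l1), ("glass_box_only", l2), ("gpt4o_both", l3),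
        ("gpt4o_r1_only", l4), ("gpt4o_r2_only", l5), ("none", l6)]).modify "glass_box_only" [] (· ++ [f])
     else if !gb && g1 && g2 then (PySem.Dict.mk [("all_three", l1), ("glass_box_only", l2), ("gpt4o_both", l3),
        ("gpt4o_r1_only", l4), ("gpt4o_r2_only", l5), ("none", l6)]).modify "gpt4o_both" [] (· ++ [f])
     else if !gb && g1 && !g2 then (PySem.Dict.mk [("all_three", l1), ("glass_box_only", l2), ("gpt4o_both", l3),
        ("gpt4o_r1_only", l4), ("gpt4o_r2_only", l5), ("none", l6)]).modify "gpt4o_r1_only" [] (· ++ [f])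
     else if !gb && !g1 && g2 then (PySem.Dict.mk [("all_three", l1), ("glass_box_only", l2), ("gpt4o_both", l3),
        ("gpt4o_r1_only", l4), ("gpt4o_r2_only", l5), ("none", l6)]).modify "gpt4o_r2_only" [] (· ++ [f])
     else if !gb && !g1 && !g2 then (PySem.Dict.mk [("all_three", l1), ("glass_box_only", l2), ("gpt4o_both", l3),
        ("gpt4o_r1_only", l4), ("gpt4o_r2_only", l5), ("none", l6)]).modify "none" [] (· ++ [f])
     else (PySem.Dict.mk [("all_three", l1), ("glass_box_only", l2), ("gpt4o_both", l3),
        ("gpt4o_r1_only", l4), ("gpt4o_r2_only", l5), ("none", l6)])) =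
    PySem.Dict.mk
      [("all_three", if G1 f && G2 f && G3 f then l1 ++ [f] else l1),
       ("glass_box_only", if G1 f && !G2 f && !G3 f then l2 ++ [f] else l2),
       ("gpt4o_both", if !G1 f && G2 f && G3 f then l3 ++ [f] else l3),
       ("gpt4o_r1_only", if !G1 f && G2 f && !G3 f then l4 ++ [f] else l4),
       ("gpt4o_r2_only", if !G1 f && !G2 f && G3 f then l5 ++ [f] else l5),
       ("none", if !G1 f && !G2 f && !G3 f then l6 ++ [f] else l6)] := by
  cases h1 : G1 f <;> cases h2 : G2 f <;> cases h3 : G3 f <;>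
    simp [PySem.Dict.modify, PySem.Dict.insert, PySem.Dict.getD,
      PySem.Dict.get?, PySem.Dict.contains]

-- A's loop: each of the six fixed buckets accumulates the filter of the traversed files
-- by that bucket's triple of detection flags.
theorem pvFoldA (G1 G2 G3 : String → Bool) (fs : List String)
    (l1 l2 l3 l4 l5 l6 : List String) :
    fs.foldl (fun c file_id =>
      let gb := G1 file_id
      let g1 := G2 file_id
      let g2 := G3 file_id
      if gb && g1 && g2 then c.modify "all_three" [] (· ++ [file_id])
      else if gb && !g1 && !g2 then c.modify "glass_box_only" [] (· ++ [file_id])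
      else if !gb && g1 && g2 then c.modify "gpt4o_both" [] (· ++ [file_id])
      else if !gb && g1 && !g2 then c.modify "gpt4o_r1_only" [] (· ++ [file_id])
      else if !gb && !g1 && g2 then c.modify "gpt4o_r2_only" [] (· ++ [file_id])
      else if !gb && !g1 && !g2 then c.modify "none" [] (· ++ [file_id])
      else c)
      (PySem.Dict.mk [("all_three", l1), ("glass_box_only", l2), ("gpt4o_both", l3),
        ("gpt4o_r1_only", l4), ("gpt4o_r2_only", l5), ("none", l6)]) =
    PySem.Dict.mk
      [("all_three", l1 ++ fs.filter (fun f => G1 f && G2 f && G3 f)),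
       ("glass_box_only", l2 ++ fs.filter (fun f => G1 f && !G2 f && !G3 f)),
       ("gpt4o_both", l3 ++ fs.filter (fun f => !G1 f && G2 f && G3 f)),
       ("gpt4o_r1_only", l4 ++ fs.filter (fun f => !G1 f && G2 f && !G3 f)),
       ("gpt4o_r2_only", l5 ++ fs.filter (fun f => !G1 f && !G2 f && G3 f)),
       ("none", l6 ++ fs.filter (fun f => !G1 f && !G2 f && !G3 f))] := by
  induction fs generalizing l1 l2 l3 l4 l5 l6 with
  | nil => simp
  | cons f fs ih =>
    rw [List.foldl_cons, pvStepA, ih]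
    simp only [List.filter_cons, pvIfAppend]

-- ===== VERDICT =====
theorem three_way_comparison_spec : Claim_equal_three_way_comparison := by
  intro glass_box gpt4o_r1 gpt4o_r2 _
  unfold Spec_three_way_comparison three_way_comparison three_way_comparison_alt pvPick
  dsimp only
  set dgb := PySem.Dict.ofList glass_box
  set d1 := PySem.Dict.ofList gpt4o_r1
  set d2 := PySem.Dict.ofList gpt4o_r2
  set fs := PySem.List.sorted
    (PySem.Set.union (PySem.Set.union (PySem.Set.ofList dgb.keys) d1.keys) d2.keys)
    (fun x => x) false
  rw [show (PySem.Dict.ofList [("all_three", ([] : List String)), ("glass_box_only", []),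
      ("gpt4o_both", []), ("gpt4o_r1_only", []), ("gpt4o_r2_only", []), ("none", [])]) =
      PySem.Dict.mk [("all_three", []), ("glass_box_only", []), ("gpt4o_both", []),
      ("gpt4o_r1_only", []), ("gpt4o_r2_only", []), ("none", [])] from rfl]
  rw [pvFoldA (pvDet dgb) (pvDet d1) (pvDet d2) fs [] [] [] [] [] []]
  have hbt : ∀ b : Bool, (b == true) = b := by decide
  have hbf : ∀ b : Bool, (b == false) = !b := by decide
  simp [hbt, hbf]
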